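-- pv_equiv track=rewrite | github.com/openai/parameter-golf | stage3_2/orchestrate_stage3_2.py | partition_gpus
-- ===== SOURCE A (Python) =====
-- def partition_gpus(gpus: list[str], slot_ids: list[str], min_per_slot: int = 1) -> list[tuple[str, str, int]]:
--     n_gpus, n_slots = len(gpus), len(slot_ids)
--     if n_slots > n_gpus:
--         raise SystemExit(f"Need {n_slots} GPUs for {n_slots} slots, only {n_gpus} available.")
--     base, extra = divmod(n_gpus, n_slots)
--     if base < min_per_slot:
--         raise SystemExit(f"Cannot allocate {min_per_slot} GPU(s)/slot with {n_gpus} GPUs for {n_slots} slots.")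
--     allocs, offset = [], 0
--     for i, sid in enumerate(slot_ids):
--         width = base + (1 if i < extra else 0)
--         allocs.append((sid, ",".join(gpus[offset:offset + width]), width))
--         offset += width
--     return allocs
-- ===== SOURCE B (Python) =====
-- def partition_gpus(gpus: list[str], slot_ids: list[str], min_per_slot: int = 1) -> list[tuple[str, str, int]]:
--     n_gpus, n_slots = len(gpus), len(slot_ids)
--     if n_slots > n_gpus:
--         raise SystemExit(f"Need {n_slots} GPUs for {n_slots} slots, only {n_gpus} available.")
--     base, extra = divmod(n_gpus, n_slots)
--     if base < min_per_slot:
--         raise SystemExit(f"Cannot allocate {min_per_slot} GPU(s)/slot with {n_gpus} GPUs for {n_slots} slots.")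
--     # Assign each GPU to its slot directly from its index (first `extra` slots are one wider),
--     # collecting per-slot buckets in a single pass over the GPUs.
--     buckets = [[] for _ in slot_ids]
--     cut = extra * (base + 1)
--     for j, g in enumerate(gpus):
--         s = j // (base + 1) if j < cut else extra + (j - cut) // base
--         buckets[s].append(g)
--     return [(sid, ",".join(b), len(b)) for sid, b in zip(slot_ids, buckets)]
-- ===== Notes on version B (the rewrite author's own statement) =====
-- stated objective: alternative
-- what changed: Instead of A's per-slot loop that slices off each slot's chunk with a running offset, B loops over the GPUs once, computes each GPU's slot directly from its index by division, collects per-slot buckets, and zips them with the slot ids; the SystemExit/ZeroDivisionError guards are unchanged and Pre_ excludes exactly the inputs where A raises (B raises identically there).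
import Mathlib
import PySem

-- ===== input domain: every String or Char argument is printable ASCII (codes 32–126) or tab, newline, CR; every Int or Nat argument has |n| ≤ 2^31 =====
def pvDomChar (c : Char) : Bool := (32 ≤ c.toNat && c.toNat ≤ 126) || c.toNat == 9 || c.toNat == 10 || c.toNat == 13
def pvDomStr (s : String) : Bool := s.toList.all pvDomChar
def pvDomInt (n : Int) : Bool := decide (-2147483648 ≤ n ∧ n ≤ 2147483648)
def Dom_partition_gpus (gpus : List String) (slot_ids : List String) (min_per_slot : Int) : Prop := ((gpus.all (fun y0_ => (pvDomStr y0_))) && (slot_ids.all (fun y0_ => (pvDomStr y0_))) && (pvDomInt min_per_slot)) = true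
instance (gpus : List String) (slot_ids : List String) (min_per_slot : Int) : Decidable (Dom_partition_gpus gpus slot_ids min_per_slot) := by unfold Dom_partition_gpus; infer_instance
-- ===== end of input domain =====

-- B assigns each GPU to its slot directly from the GPU's index (one pass over the GPUs building per-slot buckets) instead of A's per-slot loop with a running offset; equivalent on all inputs where A returns (Pre_ excludes exactly the inputs where A raises).


-- ===== PORT A =====
def partition_gpus (gpus : List String) (slot_ids : List String) (min_per_slot : Int) : List (String × String × Int) :=
  let n_gpus : Int := gpus.length
  let n_slots : Int := slot_ids.length
  if n_slots > n_gpus then []   -- raise SystemExit (excluded by Pre_)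
  else
    match PySem.Int.divmod? n_gpus n_slots with
    | none => []                -- ZeroDivisionError (excluded by Pre_)
    | some (base, extra) =>
      if base < min_per_slot then []   -- raise SystemExit (excluded by Pre_)
      else
        ((PySem.List.enumerate slot_ids 0).foldl
          (fun (st : List (String × String × Int) × Int) p =>
            let width : Int := base + (if p.1 < extra then 1 else 0)
            (st.1 ++ [(p.2, PySem.Str.join "," (PySem.List.slice gpus (some st.2) (some (st.2 + width))), width)],
             st.2 + width))
          ([], 0)).1

-- ===== PORT B =====
-- Python's buckets[s].append(g): exact whenever 0 ≤ s < bs.length, which always holds where B uses it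
def pvBucketAdd (bs : List (List String)) (s : Int) (g : String) : List (List String) :=
  if 0 ≤ s then bs.modify s.toNat (fun b => b ++ [g]) else bs

def partition_gpus_alt (gpus : List String) (slot_ids : List String) (min_per_slot : Int) : List (String × String × Int) :=
  let n_gpus : Int := gpus.length
  let n_slots : Int := slot_ids.length
  if n_slots > n_gpus then []   -- raise SystemExit (excluded by Pre_)
  else
    match PySem.Int.divmod? n_gpus n_slots with
    | none => []                -- ZeroDivisionError (excluded by Pre_)
    | some (base, extra) =>
      if base < min_per_slot then []   -- raise SystemExit (excluded by Pre_)
      else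
        let cut : Int := extra * (base + 1)
        let buckets : List (List String) :=
          (PySem.List.enumerate gpus 0).foldl
            (fun bs p =>
              let s : Int := if p.1 < cut then PySem.Int.floordiv p.1 (base + 1)
                             else extra + PySem.Int.floordiv (p.1 - cut) base
              pvBucketAdd bs s p.2)
            (slot_ids.map (fun _ => ([] : List String)))
        (slot_ids.zip buckets).map (fun p => (p.1, PySem.Str.join "," p.2, (p.2.length : Int)))

-- ===== PRECONDITION & SPEC =====
-- Pre_ excludes exactly the inputs on which A raises: SystemExit when there are more slots than
-- gpus or the per-slot base falls below min_per_slot, and ZeroDivisionError when slot_ids is empty.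
def Pre_partition_gpus (gpus : List String) (slot_ids : List String) (min_per_slot : Int) : Prop :=
  slot_ids ≠ [] ∧ (slot_ids.length : Int) ≤ (gpus.length : Int) ∧
    min_per_slot ≤ Int.fdiv (gpus.length : Int) (slot_ids.length : Int)
instance (gpus : List String) (slot_ids : List String) (min_per_slot : Int) : Decidable (Pre_partition_gpus gpus slot_ids min_per_slot) := by unfold Pre_partition_gpus; infer_instance

def pvWitness_partition_gpus : List String × List String × Int := (["a", "b", "c"], ["s1", "s2"], 1)

def Spec_partition_gpus (gpus : List String) (slot_ids : List String) (min_per_slot : Int) (out : List (String × String × Int)) : Prop := out = partition_gpus_alt gpus slot_ids min_per_slot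
instance (gpus : List String) (slot_ids : List String) (min_per_slot : Int) (out : List (String × String × Int)) : Decidable (Spec_partition_gpus gpus slot_ids min_per_slot out) := by unfold Spec_partition_gpus; infer_instance

-- ===== CLAIM (what is proved, stated in full; the proofs are below) =====
def Claim_equal_partition_gpus : Prop := ∀ (gpus : List String) (slot_ids : List String) (min_per_slot : Int), Dom_partition_gpus gpus slot_ids min_per_slot → Pre_partition_gpus gpus slot_ids min_per_slot → Spec_partition_gpus gpus slot_ids min_per_slot (partition_gpus gpus slot_ids min_per_slot)

-- ===== LEMMAS AND PROOFS =====

-- prefix sums starting after a (used to describe A's running offset)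
def pvPsums : List Int → Int → List Int
  | [], _ => []
  | w :: ws, a => (a + w) :: pvPsums ws (a + w)

theorem pvPsums_length (ws : List Int) : ∀ a, (pvPsums ws a).length = ws.length := by
  induction ws with
  | nil => intro a; simp [pvPsums]
  | cons w ws ih => intro a; simp [pvPsums, ih]

theorem pvPsums_getElem? (ws : List Int) : ∀ (a : Int) (i : Nat), i < ws.length →
    (pvPsums ws a)[i]? = some (a + (ws.take (i + 1)).sum) := by
  induction ws with
  | nil => intro a i h; simp at h
  | cons w ws ih =>
    intro a i h
    cases i with
    | zero => simp [pvPsums]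
    | succ i =>
      simp only [pvPsums, List.getElem?_cons_succ]
      rw [ih (a + w) i (by simpa using Nat.succ_lt_succ_iff.mp (by simpa using h))]
      simp [add_assoc]

-- A's running-offset loop, characterised as a map over slots with explicit starts and widths
theorem pvMain (base extra : Int) (gpus : List String) :
    ∀ (sids : List String) (ws : List Int) (k o : Int) (acc : List (String × String × Int)),
    (∀ j : Nat, j < sids.length → ws[j]? = some (base + (if k + (j : Int) < extra then 1 else 0))) →
    ((PySem.List.enumerate sids k).foldl
        (fun (st : List (String × String × Int) × Int) p =>
          let width : Int := base + (if p.1 < extra then 1 else 0)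
          (st.1 ++ [(p.2, PySem.Str.join "," (PySem.List.slice gpus (some st.2) (some (st.2 + width))), width)],
           st.2 + width))
        (acc, o)).1
      = acc ++ (sids.zip ((o :: pvPsums ws o).zip ws)).map
          (fun p => (p.1, PySem.Str.join "," (PySem.List.slice gpus (some p.2.1) (some (p.2.1 + p.2.2))), p.2.2)) := by
  intro sids
  induction sids with
  | nil => intro ws k o acc _; simp [PySem.List.enumerate_nil]
  | cons s sids ih =>
    intro ws k o acc hws
    match ws with
    | [] => have := hws 0 (by simp); simp at this
    | w :: ws' =>
      have h0 : w = base + (if k < extra then 1 else 0) := by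
        have := hws 0 (by simp); simpa using this
      have hrest : ∀ j : Nat, j < sids.length →
          ws'[j]? = some (base + (if (k + 1) + (j : Int) < extra then 1 else 0)) := by
        intro j hj
        have := hws (j + 1) (by simpa using Nat.succ_lt_succ hj)
        push_cast at this ⊢
        rw [List.getElem?_cons_succ] at this
        convert this using 4
        omega
      rw [PySem.List.enumerate_cons, List.foldl_cons]
      simp only
      rw [ih ws' (k + 1) (o + (base + (if k < extra then 1 else 0)))
        (acc ++ [(s, PySem.Str.join "," (PySem.List.slice gpus (some o) (some (o + (base + (if k < extra then 1 else 0))))), base + (if k < extra then 1 else 0))]) hrest]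
      simp [pvPsums, h0]

-- B's bucket-append, element-wise
theorem pvBucketAdd_getElem? (bs : List (List String)) (s : Int) (g : String) (i : Nat) :
    (pvBucketAdd bs s g)[i]? = bs[i]?.map (fun b => b ++ if s == (i : Int) then [g] else []) := by
  unfold pvBucketAdd
  by_cases hs : 0 ≤ s
  · rw [if_pos hs, List.getElem?_modify]
    cases h : bs[i]? with
    | none => simp
    | some bl =>
      simp only [Option.map_some]
      by_cases hsi : s = (i : Int)
      · have ht : s.toNat = i := by omega
        simp [hsi]
      · have h1 : (s == (i : Int)) = false := by simpa using hsi
        have h2 : ¬ s.toNat = i := by omega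
        simp [h1, h2]
  · rw [if_neg hs]
    have h1 : (s == (i : Int)) = false := by simp; omega
    simp [h1]

-- B's bucketing fold, element-wise: bucket i collects the gpus whose index maps to slot i
theorem pvFold_getElem? (f : Int → Int) (xs : List String) :
    ∀ (k : Int) (bs : List (List String)) (i : Nat),
    ((PySem.List.enumerate xs k).foldl (fun bs p => pvBucketAdd bs (f p.1) p.2) bs)[i]?
      = bs[i]?.map (fun b => b ++ ((PySem.List.enumerate xs k).filter (fun p => f p.1 == (i : Int))).map (fun p => p.2)) := by
  induction xs with
  | nil => intro k bs i; simp [PySem.List.enumerate_nil]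
  | cons x xs ih =>
    intro k bs i
    rw [PySem.List.enumerate_cons, List.foldl_cons]
    rw [ih (k + 1) (pvBucketAdd bs (f k) x) i, pvBucketAdd_getElem?, List.filter_cons]
    cases h : bs[i]? with
    | none => simp
    | some bl =>
      by_cases hk : f k = (i : Int)
      · simp [hk]
      · simp [hk]

-- indices in a contiguous band select a contiguous sublist
theorem pvFilterRange (xs : List String) :
    ∀ (k a b : Int),
    (((PySem.List.enumerate xs k).filter (fun p => decide (a ≤ p.1 ∧ p.1 < b))).map (fun p => p.2))
      = (xs.take (b - k).toNat).drop (a - k).toNat := by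
  induction xs with
  | nil => intro k a b; simp [PySem.List.enumerate_nil]
  | cons x xs ih =>
    intro k a b
    rw [PySem.List.enumerate_cons]
    by_cases hb : k < b
    · have ht : (b - k).toNat = (b - (k + 1)).toNat + 1 := by omega
      rw [ht, List.take_succ_cons]
      by_cases ha : a ≤ k
      · rw [List.filter_cons_of_pos (by simp; omega)]
        rw [List.map_cons, ih (k + 1) a b]
        have h1 : (a - k).toNat = 0 := by omega
        have h2 : (a - (k + 1)).toNat = 0 := by omega
        simp [h1, h2]
      · rw [List.filter_cons_of_neg (by simp; omega)]
        rw [ih (k + 1) a b]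
        have h1 : (a - k).toNat = (a - (k + 1)).toNat + 1 := by omega
        rw [h1, List.drop_succ_cons]
    · rw [List.filter_cons_of_neg (by simp; omega)]
      rw [ih (k + 1) a b]
      have h1 : (b - k).toNat = 0 := by omega
      have h2 : (b - (k + 1)).toNat = 0 := by omega
      simp [h1, h2]

theorem pvMemEnumBounds (xs : List String) (p : Int × String) (h : p ∈ PySem.List.enumerate xs 0) :
    0 ≤ p.1 ∧ p.1 < (xs.length : Int) := by
  have h1 : p.1 ∈ (PySem.List.enumerate xs 0).map (fun q => q.1) := List.mem_map_of_mem h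
  rw [PySem.List.map_fst_enumerate] at h1
  have h2 := (PySem.List.mem_pyRange_one).mp h1
  simpa using h2

-- the slot computed from a gpu index equals i exactly on the band [i*base + min i e, +width)
theorem pvSlotBand (base e m i j : Int) (hb : 1 ≤ base) (he : 0 ≤ e) (hem : e < m)
    (hi0 : 0 ≤ i) (him : i < m) (hj0 : 0 ≤ j) :
    ((if j < e * (base + 1) then PySem.Int.floordiv j (base + 1)
      else e + PySem.Int.floordiv (j - e * (base + 1)) base) = i)
      ↔ (i * base + min i e ≤ j ∧ j < i * base + min i e + (base + if i < e then 1 else 0)) := by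
  by_cases hie : i < e
  · have hmin : min i e = i := by omega
    rw [hmin, if_pos hie]
    constructor
    · intro h
      by_cases hjc : j < e * (base + 1)
      · rw [if_pos hjc, PySem.Int.floordiv_eq_iff_of_pos (by omega)] at h
        obtain ⟨h1, h2⟩ := h
        constructor <;> nlinarith
      · exfalso
        rw [if_neg hjc] at h
        have h0 : 0 ≤ PySem.Int.floordiv (j - e * (base + 1)) base := by
          rw [PySem.Int.floordiv_eq_ediv_of_pos (by omega)]
          exact Int.ediv_nonneg (by omega) (by omega)
        omega
    · rintro ⟨h1, h2⟩
      have hjc : j < e * (base + 1) := by nlinarith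
      rw [if_pos hjc, PySem.Int.floordiv_eq_iff_of_pos (by omega)]
      constructor <;> nlinarith
  · have hmin : min i e = e := by omega
    rw [hmin, if_neg hie]
    constructor
    · intro h
      by_cases hjc : j < e * (base + 1)
      · exfalso
        rw [if_pos hjc, PySem.Int.floordiv_eq_iff_of_pos (by omega)] at h
        obtain ⟨h1, h2⟩ := h
        nlinarith
      · rw [if_neg hjc] at h
        have hq : PySem.Int.floordiv (j - e * (base + 1)) base = i - e := by omega
        rw [PySem.Int.floordiv_eq_iff_of_pos (by omega)] at hq
        obtain ⟨h1, h2⟩ := hq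
        constructor <;> nlinarith
    · rintro ⟨h1, h2⟩
      have hjc : ¬ j < e * (base + 1) := by nlinarith
      rw [if_neg hjc]
      have hq : PySem.Int.floordiv (j - e * (base + 1)) base = i - e := by
        rw [PySem.Int.floordiv_eq_iff_of_pos (by omega)]
        constructor <;> nlinarith
      omega

-- sum of the first i widths
theorem pvSumTake (base e : Int) (mN : Nat) (i : Nat) (he : 0 ≤ e) (hem : e < (mN : Int)) (hi : i ≤ mN) :
    ((List.replicate e.toNat (base + 1) ++ List.replicate ((mN : Int) - e).toNat base).take i).sum
      = (i : Int) * base + min (i : Int) e := by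
  rw [List.take_append, List.take_replicate, List.take_replicate, List.sum_append,
    List.sum_replicate, List.sum_replicate, List.length_replicate]
  by_cases hie : i ≤ e.toNat
  · have h1 : min i e.toNat = i := by omega
    have h2 : i - e.toNat = 0 := by omega
    have h3 : min (i : Int) e = (i : Int) := by omega
    rw [h1, h2, h3]
    simp
    ring
  · have h1 : min i e.toNat = e.toNat := by omega
    have h2 : min (i - e.toNat) ((mN : Int) - e).toNat = i - e.toNat := by omega
    have h3 : min (i : Int) e = e := by omega
    rw [h1, h2, h3, nsmul_eq_mul, nsmul_eq_mul]
    have h4 : ((i - e.toNat : Nat) : Int) = (i : Int) - e := by omega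
    have h5 : ((e.toNat : Nat) : Int) = e := by omega
    rw [h4, h5]
    ring

-- the slot a gpu index is assigned to by B
def pvSlotFun (b e : Int) (j : Int) : Int :=
  if j < e * (b + 1) then PySem.Int.floordiv j (b + 1)
  else e + PySem.Int.floordiv (j - e * (b + 1)) b

theorem pvFold_length (f : Int → Int) (xs : List String) :
    ∀ (k : Int) (bs : List (List String)),
    ((PySem.List.enumerate xs k).foldl (fun bs p => pvBucketAdd bs (f p.1) p.2) bs).length = bs.length := by
  induction xs with
  | nil => intro k bs; simp [PySem.List.enumerate_nil]
  | cons x xs ih =>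
    intro k bs
    rw [PySem.List.enumerate_cons, List.foldl_cons, ih]
    unfold pvBucketAdd
    split
    · simp
    · rfl

theorem pvZipGet? {α β : Type} (l : List α) (l' : List β) (i : Nat) (x : α) (y : β)
    (h1 : l[i]? = some x) (h2 : l'[i]? = some y) : (l.zip l')[i]? = some (x, y) := by
  induction l generalizing l' i with
  | nil => simp at h1
  | cons a l ih =>
    cases l' with
    | nil => simp at h2
    | cons c l' =>
      cases i with
      | zero => simp_all
      | succ i => simpa using ih l' i (by simpa using h1) (by simpa using h2)

theorem pvFmod_bounds (a b : Int) (h : 0 < b) : 0 ≤ Int.fmod a b ∧ Int.fmod a b < b := by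
  rw [Int.fmod_eq_emod]
  have hd : (0:Int) ≤ b ∨ b ∣ a := Or.inl (le_of_lt h)
  simp [hd]
  exact ⟨Int.emod_nonneg a (by omega), Int.emod_lt_of_pos a h⟩

-- ===== VERDICT =====
theorem partition_gpus_spec : Claim_equal_partition_gpus := by
  intro gpus slot_ids min_per_slot _ hpre
  obtain ⟨hne, hle, hmin⟩ := hpre
  have hpos : 0 < slot_ids.length := List.length_pos_iff.mpr hne
  have hposI : (0:Int) < (slot_ids.length : Int) := by exact_mod_cast hpos
  have hdm : PySem.Int.divmod? (gpus.length : Int) (slot_ids.length : Int)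
      = some (Int.fdiv (gpus.length : Int) (slot_ids.length : Int),
              Int.fmod (gpus.length : Int) (slot_ids.length : Int)) := by
    simp [PySem.Int.divmod?, hne]
  set b : Int := Int.fdiv (gpus.length : Int) (slot_ids.length : Int) with hbdef
  set e : Int := Int.fmod (gpus.length : Int) (slot_ids.length : Int) with hedef
  have hebd := pvFmod_bounds (gpus.length : Int) (slot_ids.length : Int) hposI
  have he0 : 0 ≤ e := hebd.1
  have helt : e < (slot_ids.length : Int) := hebd.2
  have hn : (gpus.length : Int) = (slot_ids.length : Int) * b + e := by
    have h := Int.mul_fdiv_add_fmod (gpus.length : Int) (slot_ids.length : Int)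
    rw [← hbdef, ← hedef] at h
    linarith
  have hb1 : 1 ≤ b := by
    have h2 : (1:Int) * (slot_ids.length : Int) ≤ (gpus.length : Int) := by linarith
    nlinarith
  unfold Spec_partition_gpus partition_gpus partition_gpus_alt
  simp only [hdm]
  rw [if_neg (by omega), if_neg (by omega), if_neg (by omega), if_neg (by omega)]
  set ws : List Int := List.replicate e.toNat (b + 1) ++
      List.replicate (((slot_ids.length : Int)) - e).toNat b with hwsdef
  have hwslen : ws.length = slot_ids.length := by
    rw [hwsdef]; simp; omega
  have hws : ∀ j : Nat, j < slot_ids.length →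
      ws[j]? = some (b + (if (0:Int) + (j : Int) < e then 1 else 0)) := by
    intro j hj
    by_cases hje : j < e.toNat
    · rw [hwsdef, List.getElem?_append_left (by simpa using hje)]
      rw [List.getElem?_replicate, if_pos hje, if_pos (by omega)]
    · rw [hwsdef, List.getElem?_append_right (by simp only [List.length_replicate]; omega)]
      rw [List.getElem?_replicate]
      simp only [List.length_replicate]
      rw [if_pos (by omega), if_neg (by omega)]
      simp
  rw [pvMain b e gpus slot_ids ws 0 0 [] hws]
  rw [List.nil_append]
  rw [show (fun (bs : List (List String)) (p : Int × String) =>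
        pvBucketAdd bs
          (if p.1 < e * (b + 1) then PySem.Int.floordiv p.1 (b + 1)
           else e + PySem.Int.floordiv (p.1 - e * (b + 1)) b) p.2)
      = (fun bs p => pvBucketAdd bs (pvSlotFun b e p.1) p.2) from rfl]
  apply List.ext_getElem?
  intro i
  rw [List.getElem?_map, List.getElem?_map]
  by_cases him : i < slot_ids.length
  · obtain ⟨sid, hsid⟩ : ∃ sid, slot_ids[i]? = some sid := ⟨_, List.getElem?_eq_getElem him⟩
    obtain ⟨st, hstdef⟩ : ∃ st : Int, st = (i : Int) * b + min (i : Int) e := ⟨_, rfl⟩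
    obtain ⟨w, hwdef2⟩ : ∃ w : Int, w = b + (if (i : Int) < e then 1 else 0) := ⟨_, rfl⟩
    have hst? : (0 :: pvPsums ws 0)[i]? = some st := by
      rw [hstdef]
      cases i with
      | zero => simp; omega
      | succ i' =>
        rw [List.getElem?_cons_succ, pvPsums_getElem? ws 0 i' (by omega)]
        rw [hwsdef, pvSumTake b e slot_ids.length (i' + 1) he0 helt (by omega)]
        congr 1
        push_cast
        ring_nf
    have hw? : ws[i]? = some w := by
      rw [hws i him, hwdef2]
      norm_num
    have hst0 : 0 ≤ st := by
      have h1 : (0:Int) ≤ (i : Int) * b := mul_nonneg (by positivity) (by omega)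
      omega
    have hw1 : 1 ≤ w := by rw [hwdef2]; split_ifs <;> omega
    have hstwn : st + w ≤ (gpus.length : Int) := by
      rw [hstdef, hwdef2, hn]
      have h1 : ((i : Int) + 1) ≤ (slot_ids.length : Int) := by exact_mod_cast him
      have h2 := mul_le_mul_of_nonneg_right h1 (by omega : (0:Int) ≤ b)
      split_ifs with hie
      · have h4 : min (i : Int) e = (i : Int) := by omega
        rw [h4]; nlinarith
      · have h4 : min (i : Int) e = e := by omega
        rw [h4]; nlinarith
    have hband : ∀ p ∈ PySem.List.enumerate gpus 0,
        (pvSlotFun b e p.1 == (i : Int)) = decide (st ≤ p.1 ∧ p.1 < st + w) := by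
      intro p hp
      have hpb := pvMemEnumBounds gpus p hp
      have hiff := pvSlotBand b e (slot_ids.length : Int) (i : Int) p.1 hb1 he0 helt
        (by positivity) (by exact_mod_cast him) hpb.1
      rw [show (pvSlotFun b e p.1 == (i : Int)) = decide (pvSlotFun b e p.1 = (i : Int)) from rfl]
      rw [decide_eq_decide]
      unfold pvSlotFun
      rw [hstdef, hwdef2]
      exact hiff
    have hbuck : ((PySem.List.enumerate gpus 0).foldl
          (fun bs p => pvBucketAdd bs (pvSlotFun b e p.1) p.2)
          (List.map (fun x => ([] : List String)) slot_ids))[i]?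
        = some ((gpus.take (st + w).toNat).drop st.toNat) := by
      rw [pvFold_getElem?]
      rw [List.getElem?_map, hsid]
      rw [List.filter_congr hband]
      rw [pvFilterRange gpus 0 st (st + w)]
      simp
    rw [pvZipGet? _ _ _ _ _ hsid (pvZipGet? _ _ _ _ _ hst? hw?),
        pvZipGet? _ _ _ _ _ hsid hbuck]
    have hslice : PySem.List.slice gpus (some st) (some (st + w))
        = (gpus.take (st + w).toNat).drop st.toNat := by
      rw [PySem.List.slice_toNat gpus hst0 (by omega), List.drop_take]
    have hlenb : ((gpus.take (st + w).toNat).drop st.toNat).length = w.toNat := by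
      rw [List.length_drop, List.length_take]
      omega
    simp only [Option.map_some]
    rw [hslice, hlenb]
    have hwc : ((w.toNat : Nat) : Int) = w := by omega
    rw [hwc]
  · have hL : (slot_ids.zip ((0 :: pvPsums ws 0).zip ws))[i]? = none := by
      rw [List.getElem?_eq_none]
      simp [List.length_zip, pvPsums_length, hwslen]
      omega
    have hR : (slot_ids.zip ((PySem.List.enumerate gpus 0).foldl
          (fun bs p => pvBucketAdd bs (pvSlotFun b e p.1) p.2)
          (List.map (fun x => ([] : List String)) slot_ids)))[i]? = none := by
      rw [List.getElem?_eq_none]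
      rw [List.length_zip, pvFold_length]
      simp
      omega
    rw [hL, hR]
    rfl
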